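-- pv_equiv track=rewrite | github.com/eddmpython/vectrix | src/vectrix/adaptive/regime.py | _buildRegimeHistory
-- ===== SOURCE A (Python) =====
-- from typing import Dict, List, Optional, Tuple
--
-- def _buildRegimeHistory(labels: List[str]) -> List[Tuple[str, int, int]]:
--     """Group consecutive identical regimes into intervals"""
--     if not labels:
--         return []
--
--     history: List[Tuple[str, int, int]] = []
--     currentLabel = labels[0]
--     start = 0
--
--     for i in range(1, len(labels)):
--         if labels[i] != currentLabel:
--             history.append((currentLabel, start, i - 1))
--             currentLabel = labels[i]
--             start = i
--
--     history.append((currentLabel, start, len(labels) - 1))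
--     return history
-- ===== SOURCE B (Python) =====
-- from typing import List, Tuple
--
-- def _buildRegimeHistory(labels: List[str]) -> List[Tuple[str, int, int]]:
--     """Group consecutive identical regimes into intervals (boundary-first)."""
--     if not labels:
--         return []
--     n = len(labels)
--     starts = [0] + [i for i in range(1, n) if labels[i] != labels[i - 1]]
--     ends = [s - 1 for s in starts[1:]] + [n - 1]
--     return [(labels[s], s, e) for s, e in zip(starts, ends)]
-- ===== Notes on version B (the rewrite author's own statement) =====
-- stated objective: alternative
-- what changed: Instead of one stateful loop tracking (currentLabel, start) and appending at change points, B first materializes the list of run-start indices, derives each run's end from the next start (last end = n-1), and zips starts with ends to build the intervals.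
import Mathlib
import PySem

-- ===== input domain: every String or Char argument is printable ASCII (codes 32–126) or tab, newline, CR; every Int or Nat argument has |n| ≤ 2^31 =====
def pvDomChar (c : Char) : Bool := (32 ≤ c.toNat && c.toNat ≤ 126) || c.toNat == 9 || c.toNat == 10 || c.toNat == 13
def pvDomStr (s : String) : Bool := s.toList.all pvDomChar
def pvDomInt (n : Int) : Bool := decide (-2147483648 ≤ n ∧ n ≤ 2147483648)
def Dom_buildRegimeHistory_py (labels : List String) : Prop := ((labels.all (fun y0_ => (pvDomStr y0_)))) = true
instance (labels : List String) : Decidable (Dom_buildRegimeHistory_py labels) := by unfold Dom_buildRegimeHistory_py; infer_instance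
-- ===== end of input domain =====

-- B builds run-boundary lists first and zips them, instead of A's stateful loop; same O(n) cost (objective: alternative).
-- ===== PORT A =====
-- labels[i] with i always in range is ported as pyGetD with default "" (never hit on in-range indices)
def buildRegimeHistory_py (labels : List String) : List (String × Int × Int) :=
  if labels = [] then []
  else
    let n : Int := labels.length
    let st :=
      (PySem.List.pyRange 1 n 1).foldl
        (fun (acc : List (String × Int × Int) × String × Int) i =>
          match acc with
          | (history, currentLabel, start) =>
            if PySem.List.pyGetD labels i "" ≠ currentLabel then
              (history ++ [(currentLabel, start, i - 1)], PySem.List.pyGetD labels i "", i)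
            else
              (history, currentLabel, start))
        ([], PySem.List.pyGetD labels 0 "", 0)
    st.1 ++ [(st.2.1, st.2.2, n - 1)]

-- ===== PORT B =====
def buildRegimeHistory_py_alt (labels : List String) : List (String × Int × Int) :=
  if labels = [] then []
  else
    let n : Int := labels.length
    let starts : List Int :=
      0 :: (PySem.List.pyRange 1 n 1).filter
        (fun i => PySem.List.pyGetD labels i "" ≠ PySem.List.pyGetD labels (i - 1) "")
    let ends : List Int := starts.tail.map (· - 1) ++ [n - 1]
    (starts.zip ends).map (fun p => (PySem.List.pyGetD labels p.1 "", p.1, p.2))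

-- ===== PRECONDITION & SPEC =====
def Spec_buildRegimeHistory_py (labels : List String) (out : List (String × Int × Int)) : Prop := out = buildRegimeHistory_py_alt labels
instance (labels : List String) (out : List (String × Int × Int)) : Decidable (Spec_buildRegimeHistory_py labels out) := by unfold Spec_buildRegimeHistory_py; infer_instance

-- ===== CLAIM (what is proved, stated in full; the proofs are below) =====
def Claim_equal_buildRegimeHistory_py : Prop := ∀ (labels : List String), Dom_buildRegimeHistory_py labels → Spec_buildRegimeHistory_py labels (buildRegimeHistory_py labels)

-- ===== LEMMAS AND PROOFS =====

-- ===== VERDICT (by name: the statement is the Claim_ definition above) =====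
-- abbreviation used only by the proofs
def pvG (labels : List String) (i : Int) : String := PySem.List.pyGetD labels i ""

def pvCond (labels : List String) : Int → Bool :=
  fun i => decide (PySem.List.pyGetD labels i "" ≠ PySem.List.pyGetD labels (i - 1) "")

def pvStep (labels : List String) :
    (List (String × Int × Int) × String × Int) → Int → (List (String × Int × Int) × String × Int) :=
  fun acc i =>
    if PySem.List.pyGetD labels i "" ≠ acc.2.1 then
      (acc.1 ++ [(acc.2.1, acc.2.2, i - 1)], PySem.List.pyGetD labels i "", i)
    else
      acc

def pvHist (labels : List String) (starts : List Int) : List (String × Int × Int) :=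
  (starts.zip (starts.tail.map (· - 1))).map (fun p => (pvG labels p.1, p.1, p.2))

-- zip a list with its (mapped) tail extended by one element: the extra pair is (last, e)
theorem pv_zip_last {h : Int → Int} (e : Int) :
    ∀ (S : List Int), S ≠ [] →
      S.zip (S.tail.map h ++ [e]) = S.zip (S.tail.map h) ++ [(S.getLastD 0, e)] := by
  intro S
  induction S with
  | nil => intro hS; exact absurd rfl hS
  | cons a t ih =>
    intro _
    cases t with
    | nil => simp
    | cons b t' =>
      have h2 := ih (by simp)
      simp only [List.tail_cons, List.map_cons, List.cons_append, List.zip_cons_cons] at h2 ⊢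
      rw [h2]
      simp

-- zipping truncates: appending past the shorter right list changes nothing
theorem pv_zip_trunc :
    ∀ (xs ys zs : List Int), ys.length ≤ xs.length → (xs ++ zs).zip ys = xs.zip ys := by
  intro xs
  induction xs with
  | nil =>
    intro ys zs hlen
    have : ys = [] := List.eq_nil_of_length_eq_zero (Nat.le_zero.mp (by simpa using hlen))
    simp [this]
  | cons x xs ih =>
    intro ys zs hlen
    cases ys with
    | nil => simp
    | cons y ys =>
      simp only [List.cons_append, List.zip_cons_cons]
      rw [ih ys zs (by simpa using hlen)]

theorem pvHist_concat (labels : List String) (m : Int) :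
    ∀ (S : List Int), S ≠ [] →
      pvHist labels (S ++ [m]) =
        pvHist labels S ++ [(pvG labels (S.getLastD 0), S.getLastD 0, m - 1)] := by
  intro S hS
  unfold pvHist
  have htail : (S ++ [m]).tail = S.tail ++ [m] := by
    cases S with
    | nil => exact absurd rfl hS
    | cons a t => simp
  rw [htail, List.map_append]
  have hlen : (S.tail.map (· - 1) ++ [m - 1]).length ≤ S.length := by
    cases S with
    | nil => exact absurd rfl hS
    | cons a t => simp
  rw [show (List.map (· - 1) [m] : List Int) = [m - 1] by simp]
  rw [pv_zip_trunc S (S.tail.map (· - 1) ++ [m - 1]) [m] hlen]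
  rw [pv_zip_last (m - 1) S hS]
  simp

-- main invariant for A's fold: after processing indices 1..k, the state is described by
-- the run-start list S = 0 :: changePoints, and the current label equals the label at index k
theorem pv_inv (labels : List String) (k : Nat)
    (hk : (k : Int) + 1 ≤ (labels.length : Int)) :
    (PySem.List.pyRange 1 ((k : Int) + 1) 1).foldl (pvStep labels)
        ([], PySem.List.pyGetD labels 0 "", 0) =
      (pvHist labels (0 :: (PySem.List.pyRange 1 ((k : Int) + 1) 1).filter (pvCond labels)),
       pvG labels ((0 :: (PySem.List.pyRange 1 ((k : Int) + 1) 1).filter (pvCond labels)).getLastD 0),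
       (0 :: (PySem.List.pyRange 1 ((k : Int) + 1) 1).filter (pvCond labels)).getLastD 0) ∧
    pvG labels ((0 :: (PySem.List.pyRange 1 ((k : Int) + 1) 1).filter (pvCond labels)).getLastD 0)
      = pvG labels (k : Int) := by
  induction k with
  | zero =>
    rw [PySem.List.pyRange_one_eq_nil (by norm_num)]
    simp [pvHist, pvG]
  | succ k ih =>
    have hk' : (k : Int) + 1 ≤ (labels.length : Int) := by push_cast at hk ⊢; omega
    obtain ⟨ih1, ih2⟩ := ih hk'
    have hm : ((k + 1 : Nat) : Int) + 1 = ((k : Int) + 1) + 1 := by push_cast; ring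
    have hcast : ((k + 1 : Nat) : Int) = (k : Int) + 1 := by push_cast; ring
    rw [hm, hcast, PySem.List.pyRange_one_succ_right (by omega), List.foldl_append,
        List.filter_append, ih1]
    set S := 0 :: (PySem.List.pyRange 1 ((k : Int) + 1) 1).filter (pvCond labels) with hSdef
    have hSne : S ≠ [] := by simp [hSdef]
    have hsub : (k : Int) + 1 - 1 = (k : Int) := by ring
    by_cases hc : PySem.List.pyGetD labels ((k : Int) + 1) "" ≠ PySem.List.pyGetD labels ((k : Int)) ""
    · have hcond : pvCond labels ((k : Int) + 1) = true := by
        unfold pvCond; rw [hsub]; exact decide_eq_true hc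
      have hfil : List.filter (pvCond labels) [(k : Int) + 1] = [(k : Int) + 1] := by
        simp [hcond]
      have hne : PySem.List.pyGetD labels ((k : Int) + 1) "" ≠ pvG labels (S.getLastD 0) := by
        rw [ih2]; exact hc
      have hstep : pvStep labels (pvHist labels S, pvG labels (S.getLastD 0), S.getLastD 0) ((k : Int) + 1)
          = (pvHist labels S ++ [(pvG labels (S.getLastD 0), S.getLastD 0, (k : Int) + 1 - 1)],
             PySem.List.pyGetD labels ((k : Int) + 1) "", (k : Int) + 1) := by
        simp only [pvStep]
        rw [if_pos hne]
      simp only [List.foldl_cons, List.foldl_nil, hfil, hstep]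
      have hS' : (0 : Int) :: (List.filter (pvCond labels) (PySem.List.pyRange 1 ((k : Int) + 1) 1) ++ [(k : Int) + 1])
          = S ++ [(k : Int) + 1] := by simp [hSdef]
      rw [hS', pvHist_concat labels ((k : Int) + 1) S hSne, List.getLastD_concat]
      refine ⟨?_, rfl⟩
      simp [pvG, hsub]
    · rw [not_not] at hc
      have hcond : pvCond labels ((k : Int) + 1) = false := by
        unfold pvCond; rw [hsub]; simp [hc]
      have hfil : List.filter (pvCond labels) [(k : Int) + 1] = [] := by
        simp [hcond]
      have heq : PySem.List.pyGetD labels ((k : Int) + 1) "" = pvG labels (S.getLastD 0) := by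
        rw [ih2]; exact hc
      have hstep : pvStep labels (pvHist labels S, pvG labels (S.getLastD 0), S.getLastD 0) ((k : Int) + 1)
          = (pvHist labels S, pvG labels (S.getLastD 0), S.getLastD 0) := by
        simp only [pvStep]
        rw [if_neg (fun hne => hne heq)]
      simp only [List.foldl_cons, List.foldl_nil, hfil, List.append_nil, hstep]
      refine ⟨rfl, ?_⟩
      rw [ih2, show pvG labels ((k : Int) + 1) = PySem.List.pyGetD labels ((k : Int) + 1) "" from rfl, heq, ih2]

theorem buildRegimeHistory_py_spec : Claim_equal_buildRegimeHistory_py := by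
  unfold Claim_equal_buildRegimeHistory_py
  intro labels _
  unfold Spec_buildRegimeHistory_py
  by_cases hnil : labels = []
  · simp [buildRegimeHistory_py, buildRegimeHistory_py_alt, hnil]
  · have hpos : 1 ≤ labels.length := List.length_pos_iff.mpr hnil
    have hk : ((labels.length - 1 : Nat) : Int) + 1 = (labels.length : Int) := by
      have h2 := Nat.sub_add_cancel hpos
      omega
    obtain ⟨h1, _⟩ := pv_inv labels (labels.length - 1) (by rw [hk])
    rw [hk] at h1
    simp only [buildRegimeHistory_py, buildRegimeHistory_py_alt, if_neg hnil]
    have hfun : (fun (acc : List (String × Int × Int) × String × Int) i =>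
        if PySem.List.pyGetD labels i "" ≠ acc.2.1 then
          (acc.1 ++ [(acc.2.1, acc.2.2, i - 1)], PySem.List.pyGetD labels i "", i)
        else (acc.1, acc.2.1, acc.2.2)) = pvStep labels := by
      funext acc i
      obtain ⟨h, c, st⟩ := acc
      rfl
    rw [hfun, h1]
    rw [show (fun i => decide (PySem.List.pyGetD labels i "" ≠ PySem.List.pyGetD labels (i - 1) "")) = pvCond labels from rfl]
    rw [pv_zip_last ((labels.length : Int) - 1)
          (0 :: List.filter (pvCond labels) (PySem.List.pyRange 1 (labels.length : Int) 1)) (by simp),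
        List.map_append]
    simp [pvHist, pvG]
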